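-- pv_equiv track=rewrite | github.com/bgoldstone/CSI-326-Artificial-Intelligence | HW/HW6/filter.py | calculate_word_count
-- ===== SOURCE A (Python) =====
-- from typing import Dict, Tuple
--
-- def calculate_word_count(knowledge: Dict[str, int]) -> Tuple[int, int]:
--     spam = knowledge['spam']
--     ham = knowledge['ham']
--     number_of_spam_words = sum(
--         [value for key, value in spam.items() if key != 'total_files'])
--     number_of_ham_words = sum(
--         [value for key, value in ham.items() if key != 'total_files'])
--     return (number_of_spam_words, number_of_ham_words)
-- ===== SOURCE B (Python) =====
-- def calculate_word_count(knowledge):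
--     def tally(items):
--         if not items:
--             return 0
--         key, value = items[0]
--         rest = tally(items[1:])
--         return rest if key == 'total_files' else value + rest
--     return tuple(tally(list(knowledge[label].items())) for label in ('spam', 'ham'))
-- ===== Notes on version B (the rewrite author's own statement) =====
-- stated objective: alternative
-- what changed: Replaces the two filter-comprehension-plus-sum passes with one generic recursive helper that folds the item list back-to-front, skipping 'total_files' at each step, applied to both labels via a single code path.
import Mathlib
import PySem

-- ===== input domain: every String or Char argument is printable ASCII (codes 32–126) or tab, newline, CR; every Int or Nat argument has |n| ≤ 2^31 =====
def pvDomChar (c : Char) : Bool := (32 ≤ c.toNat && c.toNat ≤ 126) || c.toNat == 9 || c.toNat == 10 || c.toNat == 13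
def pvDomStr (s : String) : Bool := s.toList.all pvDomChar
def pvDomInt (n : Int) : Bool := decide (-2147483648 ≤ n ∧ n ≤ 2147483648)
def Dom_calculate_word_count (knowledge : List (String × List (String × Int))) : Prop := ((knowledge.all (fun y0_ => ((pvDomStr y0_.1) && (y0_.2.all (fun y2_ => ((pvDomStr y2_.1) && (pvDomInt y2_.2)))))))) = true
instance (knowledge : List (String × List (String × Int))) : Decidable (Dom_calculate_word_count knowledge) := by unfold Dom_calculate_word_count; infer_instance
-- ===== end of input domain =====

-- B replaces A's two filter-comprehension sums by one recursive helper that folds each item list back-to-front, skipping 'total_files'; alternative decomposition, same cost.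


-- ===== PORT A =====
-- knowledge['spam'] / knowledge['ham'] raise KeyError when absent; Pre_ guarantees presence, so the [] default of getD is never used there.
def calculate_word_count (knowledge : List (String × List (String × Int))) : Int × Int :=
  let kd := PySem.Dict.ofList knowledge
  let spam := PySem.Dict.ofList (kd.getD "spam" [])
  let ham := PySem.Dict.ofList (kd.getD "ham" [])
  let number_of_spam_words :=
    ((spam.items.filter (fun kv => kv.1 != "total_files")).map (fun kv => kv.2)).sum
  let number_of_ham_words :=
    ((ham.items.filter (fun kv => kv.1 != "total_files")).map (fun kv => kv.2)).sum
  (number_of_spam_words, number_of_ham_words)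

-- ===== PORT B =====
-- B's recursive helper 'tally': head item, recurse on the tail, skip 'total_files'.
def pvTally : List (String × Int) → Int
  | [] => 0
  | (key, value) :: t =>
      let rest := pvTally t
      if key = "total_files" then rest else value + rest

def calculate_word_count_alt (knowledge : List (String × List (String × Int))) : Int × Int :=
  let kd := PySem.Dict.ofList knowledge
  (pvTally (PySem.Dict.ofList (kd.getD "spam" [])).items,
   pvTally (PySem.Dict.ofList (kd.getD "ham" [])).items)

-- ===== PRECONDITION & SPEC =====
-- A (and B) raise KeyError unless both 'spam' and 'ham' are keys of knowledge; Pre_ excludes exactly those inputs.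
def Pre_calculate_word_count (knowledge : List (String × List (String × Int))) : Prop :=
  (PySem.Dict.ofList knowledge).contains "spam" = true ∧
  (PySem.Dict.ofList knowledge).contains "ham" = true
instance (knowledge : List (String × List (String × Int))) : Decidable (Pre_calculate_word_count knowledge) := by unfold Pre_calculate_word_count; infer_instance
def pvWitness_calculate_word_count : (List (String × List (String × Int))) :=
  [("spam", [("a", 3), ("total_files", 2)]), ("ham", [("b", 5)])]
def Spec_calculate_word_count (knowledge : List (String × List (String × Int))) (out : Int × Int) : Prop := out = calculate_word_count_alt knowledge
instance (knowledge : List (String × List (String × Int))) (out : Int × Int) : Decidable (Spec_calculate_word_count knowledge out) := by unfold Spec_calculate_word_count; infer_instance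

-- ===== CLAIM (what is proved, stated in full; the proofs are below) =====
def Claim_equal_calculate_word_count : Prop := ∀ (knowledge : List (String × List (String × Int))), Dom_calculate_word_count knowledge → Pre_calculate_word_count knowledge → Spec_calculate_word_count knowledge (calculate_word_count knowledge)

-- ===== LEMMAS AND PROOFS =====

-- B's recursive tally computes exactly A's filtered value sum, on any item list.
lemma tally_eq_filter_sum (l : List (String × Int)) :
    ((l.filter (fun kv => kv.1 != "total_files")).map (fun kv => kv.2)).sum = pvTally l := by
  induction l with
  | nil => simp [pvTally]
  | cons p t ih =>
    obtain ⟨k, v⟩ := p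
    by_cases hk : k = "total_files" <;> simp [pvTally, hk, ih]

-- ===== VERDICT (by name: the statement is the Claim_ definition above) =====
theorem calculate_word_count_spec : Claim_equal_calculate_word_count := by
  intro knowledge _ _
  show _ = _
  simp only [calculate_word_count, calculate_word_count_alt]
  rw [tally_eq_filter_sum, tally_eq_filter_sum]
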